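-- pv_equiv track=rewrite | github.com/drugdesign/FMOe | basisset.py | number_of_functions
-- ===== SOURCE A (Python) =====
-- def number_of_functions(shells):
--     cont_map = {}
--     for sh in shells:
--         ngeneral = len(sh['shell_coefficients'])
--
--         is_spdf = len(sh['shell_angular_momentum']) > 1
--
--         for am in sh['shell_angular_momentum']:
--             ncont = ngeneral if not is_spdf else 1
--
--             if am not in cont_map:
--                 cont_map[am] = ncont
--             else:
--                 cont_map[am] = cont_map[am] + ncont
--
--     s = 0
--     for am, ncont in cont_map.items():
--         s += ((am + 1) * (am + 2) // 2) * ncont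
--
--     return s
-- ===== SOURCE B (Python) =====
-- def number_of_functions(shells):
--     s = 0
--     for sh in shells:
--         ams = sh['shell_angular_momentum']
--         weight = 1 if len(ams) > 1 else len(sh['shell_coefficients'])
--         for am in ams:
--             s += (am + 1) * (am + 2) // 2 * weight
--     return s
-- ===== Notes on version B (the rewrite author's own statement) =====
-- stated objective: simpler
-- what changed: Drops the cont_map grouping dict and the second summation pass: one direct loop accumulates ((am+1)*(am+2)//2) * weight per angular momentum into a running total, valid because the per-am weight is constant so distributing equals grouping-then-multiplying.
import Mathlib
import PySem

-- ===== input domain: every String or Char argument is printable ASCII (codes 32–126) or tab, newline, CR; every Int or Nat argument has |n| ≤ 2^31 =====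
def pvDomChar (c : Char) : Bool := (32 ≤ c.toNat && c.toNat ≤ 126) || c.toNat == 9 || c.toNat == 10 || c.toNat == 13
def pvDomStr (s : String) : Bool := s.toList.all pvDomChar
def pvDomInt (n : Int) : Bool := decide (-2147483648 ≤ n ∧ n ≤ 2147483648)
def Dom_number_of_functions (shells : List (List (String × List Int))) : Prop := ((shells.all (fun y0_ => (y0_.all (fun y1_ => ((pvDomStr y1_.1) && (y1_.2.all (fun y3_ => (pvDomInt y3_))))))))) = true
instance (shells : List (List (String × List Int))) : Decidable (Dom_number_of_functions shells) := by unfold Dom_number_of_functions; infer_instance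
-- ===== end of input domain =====

-- B drops A's cont_map grouping dict and its second summation pass, accumulating the weighted sum in one direct loop (simpler).

-- ===== PORT A =====
-- sh['key'] on a dict given as an association list: first match (none = KeyError, excluded by Pre_)
def nofLookup (sh : List (String × List Int)) (k : String) : Option (List Int) :=
  (sh.find? (fun p => p.1 == k)).map (·.2)

def number_of_functions (shells : List (List (String × List Int))) : Int :=
  let cont_map : PySem.Dict Int Int :=
    shells.foldl (fun cm sh =>
      let ngeneral : Int := (((nofLookup sh "shell_coefficients").getD []).length : Int)
      let ams := (nofLookup sh "shell_angular_momentum").getD []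
      let is_spdf : Bool := ams.length > 1
      ams.foldl (fun cm am =>
        let ncont : Int := if !is_spdf then ngeneral else 1
        if cm.contains am = false then cm.insert am ncont
        else cm.insert am (cm.getD am 0 + ncont)) cm) PySem.Dict.empty
  cont_map.items.foldl (fun s p => s + PySem.Int.floordiv ((p.1 + 1) * (p.1 + 2)) 2 * p.2) 0

-- ===== PORT B =====
def number_of_functions_alt (shells : List (List (String × List Int))) : Int :=
  shells.foldl (fun s sh =>
    let ams := (nofLookup sh "shell_angular_momentum").getD []
    let weight : Int := if ams.length > 1 then 1
                        else (((nofLookup sh "shell_coefficients").getD []).length : Int)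
    ams.foldl (fun s am => s + PySem.Int.floordiv ((am + 1) * (am + 2)) 2 * weight) s) 0

-- ===== PRECONDITION & SPEC =====
-- Pre_ excludes only shells missing one of the two keys, where Python A raises KeyError.
def Pre_number_of_functions (shells : List (List (String × List Int))) : Prop :=
  (shells.all (fun sh =>
    (sh.find? (fun p => p.1 == "shell_coefficients")).isSome &&
    (sh.find? (fun p => p.1 == "shell_angular_momentum")).isSome)) = true
instance (shells : List (List (String × List Int))) : Decidable (Pre_number_of_functions shells) := by
  unfold Pre_number_of_functions; infer_instance

def pvWitness_number_of_functions : (List (List (String × List Int))) :=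
  [[("shell_coefficients", [1, 2]), ("shell_angular_momentum", [0, 1])]]

def Spec_number_of_functions (shells : List (List (String × List Int))) (out : Int) : Prop := out = number_of_functions_alt shells
instance (shells : List (List (String × List Int))) (out : Int) : Decidable (Spec_number_of_functions shells out) := by unfold Spec_number_of_functions; infer_instance

-- ===== CLAIM (what is proved, stated in full; the proofs are below) =====
def Claim_equal_number_of_functions : Prop := ∀ (shells : List (List (String × List Int))), Dom_number_of_functions shells → Pre_number_of_functions shells → Spec_number_of_functions shells (number_of_functions shells)

-- ===== LEMMAS AND PROOFS =====

-- the per-angular-momentum weight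
def nofW (am : Int) : Int := PySem.Int.floordiv ((am + 1) * (am + 2)) 2

-- weighted sum of a dict's items (A's second loop, as a map-sum)
def nofWsum (cm : PySem.Dict Int Int) : Int := (cm.items.map (fun p => nofW p.1 * p.2)).sum

-- the per-shell contribution both programs compute
def nofShell (sh : List (String × List Int)) : Int :=
  let ams := (nofLookup sh "shell_angular_momentum").getD []
  let weight : Int := if ams.length > 1 then 1
                      else (((nofLookup sh "shell_coefficients").getD []).length : Int)
  (ams.map (fun am => nofW am * weight)).sum

-- A's conditional dict update collapses to a single insert
theorem nof_step_eq (cm : PySem.Dict Int Int) (am n : Int) :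
    (if cm.contains am = false then cm.insert am n
     else cm.insert am (cm.getD am 0 + n)) = cm.insert am (cm.getD am 0 + n) := by
  split
  · rename_i h
    rw [PySem.Dict.getD_of_not_contains cm 0 h, zero_add]
  · rfl

theorem nof_sum_map_overwrite (l : List (Int × Int)) (am v0 vn : Int)
    (hnd : (l.map (·.1)).Nodup) (hmem : (am, v0) ∈ l) :
    ((l.map (fun p => if p.1 == am then (am, vn) else p)).map (fun p => nofW p.1 * p.2)).sum
      = (l.map (fun p => nofW p.1 * p.2)).sum - nofW am * v0 + nofW am * vn := by
  induction l with
  | nil => simp at hmem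
  | cons p rest ih =>
    simp only [List.map_cons, List.nodup_cons, List.mem_map] at hnd
    rcases List.mem_cons.mp hmem with h | h
    · subst h
      have hrest : rest.map (fun p => if p.1 == am then (am, vn) else p) = rest := by
        calc rest.map (fun p => if p.1 == am then (am, vn) else p)
            = rest.map id := by
              apply List.map_congr_left
              intro q hq
              have : ¬ (q.1 == am) = true := by
                simp only [beq_iff_eq]
                intro he; exact hnd.1 ⟨q, hq, he⟩
              simp [this]
          _ = rest := List.map_id rest
      simp only [List.map_cons, beq_self_eq_true, if_true, hrest, List.sum_cons]
      ring
    · have hne : ¬ (p.1 == am) = true := by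
        simp only [beq_iff_eq]
        intro he
        exact hnd.1 ⟨(am, v0), h, by rw [he]⟩
      simp only [List.map_cons, if_neg hne, List.sum_cons]
      rw [ih hnd.2 h]
      ring

theorem nofWsum_insert (cm : PySem.Dict Int Int) (am n : Int) (hnd : cm.keys.Nodup) :
    nofWsum (cm.insert am (cm.getD am 0 + n)) = nofWsum cm + nofW am * n := by
  by_cases h : cm.contains am = true
  · unfold nofWsum
    rw [PySem.Dict.items_insert_of_contains cm _ h]
    have hmem : (am, cm.getD am 0) ∈ cm.items := by
      apply (PySem.Dict.get?_eq_some_iff_mem_items cm am _ hnd).mp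
      rcases hgs : cm.get? am with _ | v
      · exfalso
        rw [PySem.Dict.contains_eq_isSome_get?, hgs] at h; simp at h
      · rw [PySem.Dict.getD_of_get?_eq_some cm 0 hgs]
    rw [nof_sum_map_overwrite cm.items am (cm.getD am 0) _ hnd hmem]
    ring
  · have h' : cm.contains am = false := by simpa using h
    unfold nofWsum
    rw [PySem.Dict.items_insert_of_not_contains cm _ h']
    rw [PySem.Dict.getD_of_not_contains cm 0 h']
    simp

-- inner loop invariant: bumping each am by a constant n adds the weighted sum directly
theorem nof_inner (ams : List Int) (cm : PySem.Dict Int Int) (n : Int)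
    (hnd : cm.keys.Nodup) :
    nofWsum (ams.foldl (fun cm am => cm.insert am (cm.getD am 0 + n)) cm)
      = nofWsum cm + (ams.map (fun am => nofW am * n)).sum := by
  induction ams generalizing cm with
  | nil => simp
  | cons a rest ih =>
    simp only [List.foldl_cons, List.map_cons, List.sum_cons]
    rw [ih _ (PySem.Dict.nodup_keys_insert _ _ _ hnd)]
    rw [nofWsum_insert _ _ _ hnd]
    ring

theorem nof_inner_nodup (ams : List Int) (cm : PySem.Dict Int Int) (n : Int)
    (hnd : cm.keys.Nodup) :
    ((ams.foldl (fun cm am => cm.insert am (cm.getD am 0 + n)) cm).keys).Nodup := by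
  induction ams generalizing cm with
  | nil => exact hnd
  | cons a rest ih =>
    simp only [List.foldl_cons]
    exact ih _ (PySem.Dict.nodup_keys_insert _ _ _ hnd)

-- A's shell step in collapsed form, and the weight match between A's ncont and B's weight
theorem nof_shell_step (cm : PySem.Dict Int Int) (sh : List (String × List Int))
    (hnd : cm.keys.Nodup) :
    nofWsum ((((nofLookup sh "shell_angular_momentum").getD []).foldl (fun cm am =>
        let ncont : Int := if !((((nofLookup sh "shell_angular_momentum").getD []).length > 1 : Bool)) then (((nofLookup sh "shell_coefficients").getD []).length : Int) else 1
        if cm.contains am = false then cm.insert am ncont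
        else cm.insert am (cm.getD am 0 + ncont)) cm))
      = nofWsum cm + nofShell sh := by
  set ams := (nofLookup sh "shell_angular_momentum").getD [] with hams
  set ng : Int := (((nofLookup sh "shell_coefficients").getD []).length : Int) with hng
  set n : Int := if !((ams.length > 1 : Bool)) then ng else 1 with hn
  have hfun : (fun (cm : PySem.Dict Int Int) (am : Int) =>
      if cm.contains am = false then cm.insert am n
      else cm.insert am (cm.getD am 0 + n))
      = fun cm am => cm.insert am (cm.getD am 0 + n) := by
    funext cm am; exact nof_step_eq cm am n
  rw [hfun, nof_inner ams cm n hnd]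
  have hw : n = (if ams.length > 1 then 1 else ng) := by
    by_cases h : ams.length > 1 <;> simp [hn, h]
  rw [hw]
  rfl

-- outer loop invariant for A
theorem nof_outer (shells : List (List (String × List Int))) (cm : PySem.Dict Int Int)
    (hnd : cm.keys.Nodup) :
    nofWsum (shells.foldl (fun cm sh =>
      let ngeneral : Int := (((nofLookup sh "shell_coefficients").getD []).length : Int)
      let ams := (nofLookup sh "shell_angular_momentum").getD []
      let is_spdf : Bool := ams.length > 1
      ams.foldl (fun cm am =>
        let ncont : Int := if !is_spdf then ngeneral else 1
        if cm.contains am = false then cm.insert am ncont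
        else cm.insert am (cm.getD am 0 + ncont)) cm) cm)
      = nofWsum cm + (shells.map nofShell).sum := by
  induction shells generalizing cm with
  | nil => simp
  | cons sh rest ih =>
    simp only [List.foldl_cons, List.map_cons, List.sum_cons]
    have hnd' : ((((nofLookup sh "shell_angular_momentum").getD []).foldl (fun cm am =>
        let ncont : Int := if !((((nofLookup sh "shell_angular_momentum").getD []).length > 1 : Bool)) then (((nofLookup sh "shell_coefficients").getD []).length : Int) else 1
        if cm.contains am = false then cm.insert am ncont
        else cm.insert am (cm.getD am 0 + ncont)) cm).keys).Nodup := by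
      have hfun : (fun (cm : PySem.Dict Int Int) (am : Int) =>
          let ncont : Int := if !((((nofLookup sh "shell_angular_momentum").getD []).length > 1 : Bool)) then (((nofLookup sh "shell_coefficients").getD []).length : Int) else 1
          if cm.contains am = false then cm.insert am ncont
          else cm.insert am (cm.getD am 0 + ncont))
          = fun cm am => cm.insert am (cm.getD am 0 + (if !((((nofLookup sh "shell_angular_momentum").getD []).length > 1 : Bool)) then (((nofLookup sh "shell_coefficients").getD []).length : Int) else 1)) := by
        funext cm am; exact nof_step_eq cm am _
      rw [hfun]
      exact nof_inner_nodup _ _ _ hnd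
    rw [ih _ hnd', nof_shell_step cm sh hnd]
    ring

-- B accumulates exactly the per-shell contributions
theorem nof_alt_acc (shells : List (List (String × List Int))) (s : Int) :
    shells.foldl (fun s sh =>
      let ams := (nofLookup sh "shell_angular_momentum").getD []
      let weight : Int := if ams.length > 1 then 1
                          else (((nofLookup sh "shell_coefficients").getD []).length : Int)
      ams.foldl (fun s am => s + PySem.Int.floordiv ((am + 1) * (am + 2)) 2 * weight) s) s
    = s + (shells.map nofShell).sum := by
  induction shells generalizing s with
  | nil => simp
  | cons sh rest ih =>
    simp only [List.foldl_cons, List.map_cons, List.sum_cons]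
    rw [ih]
    have : ((nofLookup sh "shell_angular_momentum").getD []).foldl (fun s am =>
        s + PySem.Int.floordiv ((am + 1) * (am + 2)) 2 * (if ((nofLookup sh "shell_angular_momentum").getD []).length > 1 then 1 else (((nofLookup sh "shell_coefficients").getD []).length : Int))) s
        = s + nofShell sh := by
      rw [PySem.List.foldl_add ((nofLookup sh "shell_angular_momentum").getD []) (fun am => PySem.Int.floordiv ((am + 1) * (am + 2)) 2 * (if ((nofLookup sh "shell_angular_momentum").getD []).length > 1 then 1 else (((nofLookup sh "shell_coefficients").getD []).length : Int))) s]
      rfl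
    rw [this]
    ring

theorem nof_fin (l : List (Int × Int)) :
    l.foldl (fun s p => s + PySem.Int.floordiv ((p.1 + 1) * (p.1 + 2)) 2 * p.2) 0
      = (l.map (fun p => nofW p.1 * p.2)).sum := by
  rw [PySem.List.foldl_add l (fun p => PySem.Int.floordiv ((p.1 + 1) * (p.1 + 2)) 2 * p.2) 0]
  rw [zero_add]
  rfl

-- ===== VERDICT (by name: the statement is the Claim_ definition above) =====
theorem number_of_functions_spec : Claim_equal_number_of_functions := by
  intro shells _ _
  show number_of_functions shells = number_of_functions_alt shells
  have h0 : (PySem.Dict.empty : PySem.Dict Int Int).keys.Nodup := PySem.Dict.nodup_keys_empty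
  have hA : number_of_functions shells = nofWsum (shells.foldl (fun cm sh =>
      let ngeneral : Int := (((nofLookup sh "shell_coefficients").getD []).length : Int)
      let ams := (nofLookup sh "shell_angular_momentum").getD []
      let is_spdf : Bool := ams.length > 1
      ams.foldl (fun cm am =>
        let ncont : Int := if !is_spdf then ngeneral else 1
        if cm.contains am = false then cm.insert am ncont
        else cm.insert am (cm.getD am 0 + ncont)) cm) PySem.Dict.empty) :=
    nof_fin _
  have hB : number_of_functions_alt shells = 0 + (shells.map nofShell).sum := nof_alt_acc shells 0
  rw [hA, nof_outer shells PySem.Dict.empty h0, hB]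
  simp [nofWsum, PySem.Dict.empty]
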